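-- pv_equiv track=rewrite | github.com/KorwinBriggs/Idlequest | gameparser.py | divide_list_at_keywords
-- ===== SOURCE A (Python) =====
-- def divide_list_at_keywords(words_list, keywords_list):
--     keywords_indices = []
--     for index, word in enumerate(words_list):
--         if word in keywords_list:
--             keywords_indices.append(index)
--     keywords_indices.append(len(words_list)) # adding final cutoff for last section
--
--     # split word list by those indices, into one list per command
--     sections = []
--     for index in range(len(keywords_indices)-1):
--         sub_list = words_list[keywords_indices[index]:keywords_indices[index+1]]
--         if '' in sub_list:
--             sub_list.remove('') # removing trailing '' from lists
--         sections.append(sub_list)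
--
--     return sections
-- ===== SOURCE B (Python) =====
-- def divide_list_at_keywords(words_list, keywords_list):
--     keywords = set(keywords_list)
--
--     def finish(section):
--         if '' in section:
--             section.remove('')
--         return section
--
--     sections = []
--     current = None
--     for word in words_list:
--         if word in keywords:
--             if current is not None:
--                 sections.append(finish(current))
--             current = [word]
--         elif current is not None:
--             current.append(word)
--     if current is not None:
--         sections.append(finish(current))
--     return sections
-- ===== Notes on version B (the rewrite author's own statement) =====
-- stated objective: faster
-- what changed: Replaces A's two-phase index-collection-then-slicing with a single pass over words_list keeping a 'current section' accumulator (a keyword closes the open section and opens a new one), using a set for keyword membership; no index list and no slicing.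
import Mathlib
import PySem

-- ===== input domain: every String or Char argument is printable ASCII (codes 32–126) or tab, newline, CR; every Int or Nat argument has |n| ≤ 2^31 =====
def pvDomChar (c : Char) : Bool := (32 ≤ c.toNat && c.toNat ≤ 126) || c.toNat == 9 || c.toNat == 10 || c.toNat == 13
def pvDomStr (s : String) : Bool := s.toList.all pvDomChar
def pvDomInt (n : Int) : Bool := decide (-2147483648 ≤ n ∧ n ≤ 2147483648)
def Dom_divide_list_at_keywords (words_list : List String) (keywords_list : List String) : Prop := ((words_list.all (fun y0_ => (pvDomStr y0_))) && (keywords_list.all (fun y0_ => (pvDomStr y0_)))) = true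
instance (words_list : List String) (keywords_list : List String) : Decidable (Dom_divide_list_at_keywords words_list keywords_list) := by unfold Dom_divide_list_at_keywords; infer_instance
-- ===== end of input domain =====

-- B replaces A's two-phase index-collection-then-slicing by a single accumulator pass (simpler decomposition, same return values).


-- ===== PORT A =====
-- literal port of A: collect keyword indices by enumerate, append the final cutoff,
-- then for index in range(len-1) slice words_list and remove one '' if present.
def divide_list_at_keywords (words_list : List String) (keywords_list : List String) : List (List String) :=
  let keywords_indices : List Int :=
    (PySem.List.enumerate words_list 0).foldl
      (fun acc p => if keywords_list.contains p.2 then acc ++ [p.1] else acc) []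
  let keywords_indices := keywords_indices ++ [(words_list.length : Int)]
  (PySem.List.pyRange 0 ((keywords_indices.length : Int) - 1) 1).foldl
    (fun sections index =>
      let sub_list := PySem.List.slice words_list
        (some (PySem.List.pyGetD keywords_indices index 0))
        (some (PySem.List.pyGetD keywords_indices (index + 1) 0))
      let sub_list :=
        if sub_list.contains "" then (PySem.List.remove? sub_list "").getD sub_list else sub_list
      sections ++ [sub_list]) []

-- ===== PORT B =====
-- B's helper finish(section): remove the first '' if present
def pyFinish (sec : List String) : List String :=
  if sec.contains "" then (PySem.List.remove? sec "").getD sec else sec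

-- literal port of B: one pass with a 'current section' accumulator (None = no open section)
def divide_list_at_keywords_alt (words_list : List String) (keywords_list : List String) : List (List String) :=
  let keywords := PySem.Set.ofList keywords_list
  let st := words_list.foldl
    (fun (st : List (List String) × Option (List String)) word =>
      if PySem.Set.contains keywords word then
        (match st.2 with
         | some current => st.1 ++ [pyFinish current]
         | none => st.1, some [word])
      else
        match st.2 with
        | some current => (st.1, some (current ++ [word]))
        | none => st)
    ([], none)
  match st.2 with
  | some current => st.1 ++ [pyFinish current]
  | none => st.1

-- ===== PRECONDITION & SPEC =====
def Spec_divide_list_at_keywords (words_list : List String) (keywords_list : List String) (out : List (List String)) : Prop := out = divide_list_at_keywords_alt words_list keywords_list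
instance (words_list : List String) (keywords_list : List String) (out : List (List String)) : Decidable (Spec_divide_list_at_keywords words_list keywords_list out) := by unfold Spec_divide_list_at_keywords; infer_instance

-- ===== CLAIM (what is proved, stated in full; the proofs are below) =====
def Claim_equal_divide_list_at_keywords : Prop := ∀ (words_list : List String) (keywords_list : List String), Dom_divide_list_at_keywords words_list keywords_list → Spec_divide_list_at_keywords words_list keywords_list (divide_list_at_keywords words_list keywords_list)

-- ===== LEMMAS AND PROOFS =====

-- nat positions of keywords in the word list
def kwIdx (kw : String → Bool) : List String → List Nat
  | [] => []
  | w :: ws => if kw w then 0 :: (kwIdx kw ws).map (· + 1) else (kwIdx kw ws).map (· + 1)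

-- common recursive section-splitter (raw sections, before pyFinish)
def raw (kw : String → Bool) : List String → Option (List String) → List (List String)
  | [], none => []
  | [], some c => [c]
  | w :: ws, none => if kw w then raw kw ws (some [w]) else raw kw ws none
  | w :: ws, some c => if kw w then c :: raw kw ws (some [w]) else raw kw ws (some (c ++ [w]))

-- index of the first keyword (or length if none)
def firstIdx (kw : String → Bool) (ws : List String) : Nat :=
  match kwIdx kw ws with
  | [] => ws.length
  | i :: _ => i

lemma raw_none_dropWhile (kw : String → Bool) (ws : List String) :
    raw kw (ws.dropWhile (fun x => !kw x)) none = raw kw ws none := by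
  induction ws with
  | nil => rfl
  | cons w ws ih =>
    by_cases h : kw w
    · simp [List.dropWhile, h, raw]
    · simp [List.dropWhile, h, raw, ih]

lemma raw_some (kw : String → Bool) (ws : List String) (c : List String) :
    raw kw ws (some c) =
      (c ++ ws.takeWhile (fun x => !kw x)) :: raw kw (ws.dropWhile (fun x => !kw x)) none := by
  induction ws generalizing c with
  | nil => simp [raw, List.takeWhile, List.dropWhile]
  | cons w ws ih =>
    by_cases h : kw w
    · simp [raw, h, List.takeWhile, List.dropWhile]
    · simp [raw, h, List.takeWhile, List.dropWhile, ih, List.append_assoc]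

lemma take_firstIdx (kw : String → Bool) (ws : List String) :
    ws.take (firstIdx kw ws) = ws.takeWhile (fun x => !kw x) := by
  induction ws with
  | nil => simp [firstIdx, kwIdx]
  | cons w ws ih =>
    by_cases h : kw w
    · simp [firstIdx, kwIdx, h, List.takeWhile]
    · have hfi : firstIdx kw (w :: ws) = firstIdx kw ws + 1 := by
        simp only [firstIdx, kwIdx, h]
        cases kwIdx kw ws <;> simp
      rw [hfi]
      simp [List.takeWhile, h, ih]

-- the nat-level sections of A
def secsN (kw : String → Bool) (words : List String) : List (List String) :=
  (((kwIdx kw words) ++ [words.length]).zip ((kwIdx kw words) ++ [words.length]).tail).map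
    (fun p => (words.drop p.1).take (p.2 - p.1))

lemma zip_tail_map {α β : Type} (f : α → β) (l : List α) :
    (l.map f).zip (l.map f).tail = (l.zip l.tail).map (Prod.map f f) := by
  rw [← List.map_tail, List.zip_map]

lemma secsN_eq_raw (kw : String → Bool) (words : List String) :
    secsN kw words = raw kw words none := by
  induction words with
  | nil => simp [secsN, kwIdx, raw]
  | cons w ws ih =>
    by_cases h : kw w
    · -- first section = w :: takeWhile, rest = secsN ws
      have hxs : kwIdx kw (w :: ws) ++ [(w :: ws).length] =
          0 :: ((kwIdx kw ws ++ [ws.length]).map (· + 1)) := by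
        simp [kwIdx, h]
      have hne : kwIdx kw ws ++ [ws.length] ≠ [] := by simp
      obtain ⟨x0, xtl, hx⟩ := List.exists_cons_of_ne_nil hne
      have hx0 : x0 = firstIdx kw ws := by
        unfold firstIdx
        cases hkl : kwIdx kw ws with
        | nil => rw [hkl] at hx; simp at hx; exact hx.1.symm
        | cons i t => rw [hkl] at hx; simp at hx; exact hx.1.symm
      have hsec : secsN kw (w :: ws) = ((w :: ws).take (x0 + 1)) :: secsN kw ws := by
        unfold secsN
        rw [hxs]
        have hzip : (0 :: ((kwIdx kw ws ++ [ws.length]).map (· + 1))).zip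
              ((0 :: ((kwIdx kw ws ++ [ws.length]).map (· + 1))).tail)
            = (0, x0 + 1) :: (((kwIdx kw ws ++ [ws.length]).map (· + 1)).zip
                (((kwIdx kw ws ++ [ws.length]).map (· + 1)).tail)) := by
          rw [hx]; simp
        rw [hzip, List.map_cons, List.cons_eq_cons]
        refine ⟨by simp, ?_⟩
        rw [zip_tail_map, List.map_map]
        apply List.map_congr_left
        intro p _
        simp only [Function.comp, Prod.map]
        have h2 : p.2 + 1 - (p.1 + 1) = p.2 - p.1 := by omega
        simp [h2]
      rw [hsec, ih]
      have htake : (w :: ws).take (x0 + 1) = w :: ws.takeWhile (fun x => !kw x) := by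
        rw [hx0]
        simp [List.take, take_firstIdx]
      rw [htake]
      show _ = raw kw (w :: ws) none
      simp only [raw, h, if_pos]
      rw [raw_some]
      simp [raw_none_dropWhile]
    · have hxs : kwIdx kw (w :: ws) ++ [(w :: ws).length] =
          (kwIdx kw ws ++ [ws.length]).map (· + 1) := by
        simp [kwIdx, h]
      have heq : secsN kw (w :: ws) = secsN kw ws := by
        unfold secsN
        rw [hxs, zip_tail_map, List.map_map]
        apply List.map_congr_left
        intro p _
        simp only [Function.comp, Prod.map]
        have h2 : p.2 + 1 - (p.1 + 1) = p.2 - p.1 := by omega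
        simp [h2]
      rw [heq, ih]
      simp [raw, h]

-- A's enumerate loop collects exactly the keyword indices (as Ints, shifted by the start)
lemma enum_fold (kw : String → Bool) (words : List String) (s : Int) (acc : List Int) :
    (PySem.List.enumerate words s).foldl
      (fun acc p => if kw p.2 then acc ++ [p.1] else acc) acc
    = acc ++ (kwIdx kw words).map (fun n : Nat => s + (n : Int)) := by
  induction words generalizing s acc with
  | nil => simp [PySem.List.enumerate_nil, kwIdx]
  | cons w ws ih =>
    rw [PySem.List.enumerate_cons, List.foldl_cons]
    by_cases h : kw w
    · simp only [h, if_true]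
      rw [ih]
      simp only [kwIdx, h, if_true, List.map_cons, List.map_map, List.append_assoc,
        List.singleton_append]
      congr 1
      rw [List.cons_eq_cons]
      refine ⟨by norm_num, ?_⟩
      apply List.map_congr_left
      intro a _
      simp only [Function.comp]
      push_cast
      ring
    · simp only [h, if_false, Bool.false_eq_true]
      rw [ih]
      simp only [kwIdx, h, if_false, Bool.false_eq_true, List.map_map]
      congr 1
      apply List.map_congr_left
      intro a _
      simp only [Function.comp]
      push_cast
      ring

-- A's range loop over consecutive index pairs is a map over zip-with-tail
lemma range_fold {α : Type} (l : List Int) (f : Int → Int → α) :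
    (PySem.List.pyRange 0 ((l.length : Int) - 1) 1).foldl
      (fun acc i => acc ++ [f (PySem.List.pyGetD l i 0) (PySem.List.pyGetD l (i + 1) 0)]) []
    = (l.zip l.tail).map (fun p => f p.1 p.2) := by
  cases l with
  | nil => simp [PySem.List.pyRange_one_eq_nil]
  | cons x t =>
    have hlen : ((x :: t).length : Int) - 1 = (t.length : Int) := by simp
    rw [hlen, PySem.List.pyRange_one]
    simp only [sub_zero, Int.toNat_natCast]
    rw [List.foldl_map, PySem.List.foldl_append_singleton_eq_map]
    apply List.ext_getElem
    · simp [List.length_zip]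
    · intro k h1 h2
      simp only [List.nil_append, List.getElem_map, List.getElem_range, List.getElem_zip]
      have hk : k < t.length := by simpa using h1
      have g1 : PySem.List.pyGetD (x :: t) (0 + (k : Int)) 0 = (x :: t)[k] := by
        rw [zero_add, PySem.List.pyGetD_natCast]
        exact List.getD_eq_getElem _ _ (by simp; omega)
      have g2 : PySem.List.pyGetD (x :: t) (0 + (k : Int) + 1) 0 = (x :: t)[k + 1] := by
        have : (0 : Int) + (k : Int) + 1 = ((k + 1 : Nat) : Int) := by push_cast; ring
        rw [this, PySem.List.pyGetD_natCast]
        exact List.getD_eq_getElem _ _ (by simp; omega)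
      rw [g1, g2]
      congr 1

-- A computes the pyFinish-image of the nat-level sections
lemma A_eq_secsN (words_list keywords_list : List String) :
    divide_list_at_keywords words_list keywords_list =
      (secsN (fun w => keywords_list.contains w) words_list).map pyFinish := by
  simp only [divide_list_at_keywords]
  rw [enum_fold (fun w => keywords_list.contains w) words_list 0 []]
  simp only [List.nil_append]
  have hidx : (kwIdx (fun w => keywords_list.contains w) words_list).map
        (fun n : Nat => (0 : Int) + (n : Int)) ++ [(words_list.length : Int)]
      = ((kwIdx (fun w => keywords_list.contains w) words_list) ++ [words_list.length]).map
          (fun n : Nat => (n : Int)) := by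
    simp
  rw [hidx]
  have h3 := range_fold
    (((kwIdx (fun w => keywords_list.contains w) words_list) ++ [words_list.length]).map
      (fun n : Nat => (n : Int)))
    (fun a b => pyFinish (PySem.List.slice words_list (some a) (some b)))
  have htail :
      ((((kwIdx (fun w => keywords_list.contains w) words_list) ++ [words_list.length]).map
          (fun n : Nat => (n : Int))).zip
        ((((kwIdx (fun w => keywords_list.contains w) words_list) ++ [words_list.length]).map
          (fun n : Nat => (n : Int))).tail)).map
        (fun p => pyFinish (PySem.List.slice words_list (some p.1) (some p.2)))
      = (secsN (fun w => keywords_list.contains w) words_list).map pyFinish := by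
    rw [zip_tail_map]
    unfold secsN
    rw [List.map_map, List.map_map]
    apply List.map_congr_left
    intro p _
    simp only [Function.comp, Prod.map]
    rw [PySem.List.slice_natCast]
  exact h3.trans htail

-- B's loop, generalized over the accumulator, equals raw followed by pyFinish
lemma B_loop (kw : String → Bool) (ws : List String)
    (secs : List (List String)) (cur : Option (List String)) :
    (match (ws.foldl
      (fun (st : List (List String) × Option (List String)) word =>
        if kw word then
          (match st.2 with
           | some current => st.1 ++ [pyFinish current]
           | none => st.1, some [word])
        else
          match st.2 with
          | some current => (st.1, some (current ++ [word]))
          | none => st)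
      (secs, cur)).2 with
     | some current => (ws.foldl
      (fun (st : List (List String) × Option (List String)) word =>
        if kw word then
          (match st.2 with
           | some current => st.1 ++ [pyFinish current]
           | none => st.1, some [word])
        else
          match st.2 with
          | some current => (st.1, some (current ++ [word]))
          | none => st)
      (secs, cur)).1 ++ [pyFinish current]
     | none => (ws.foldl
      (fun (st : List (List String) × Option (List String)) word =>
        if kw word then
          (match st.2 with
           | some current => st.1 ++ [pyFinish current]
           | none => st.1, some [word])
        else
          match st.2 with
          | some current => (st.1, some (current ++ [word]))
          | none => st)
      (secs, cur)).1)
    = secs ++ (raw kw ws cur).map pyFinish := by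
  induction ws generalizing secs cur with
  | nil => cases cur <;> simp [raw]
  | cons w ws ih =>
    by_cases h : kw w
    · cases cur with
      | none =>
        simp only [List.foldl_cons, h, if_pos]
        rw [ih]
        simp [raw, h]
      | some c =>
        simp only [List.foldl_cons, h, if_pos]
        rw [ih]
        simp [raw, h]
    · cases cur with
      | none =>
        simp only [List.foldl_cons, h]
        rw [ih]
        simp [raw, h]
      | some c =>
        simp only [List.foldl_cons, h]
        rw [ih]
        simp [raw, h]

lemma B_eq_raw (words_list keywords_list : List String) :
    divide_list_at_keywords_alt words_list keywords_list =
      (raw (fun w => keywords_list.contains w) words_list none).map pyFinish := by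
  simp only [divide_list_at_keywords_alt]
  have hmem : ∀ w : String, PySem.Set.contains (PySem.Set.ofList keywords_list) w = keywords_list.contains w := by
    intro w
    by_cases hw : w ∈ keywords_list
    · simp [PySem.Set.contains_eq_listContains, hw, (PySem.Set.mem_ofList keywords_list w).mpr hw]
    · have hns : w ∉ PySem.Set.ofList keywords_list := fun hc => hw ((PySem.Set.mem_ofList keywords_list w).mp hc)
      simp [PySem.Set.contains_eq_listContains, hw, hns]
  have hfun : (fun (st : List (List String) × Option (List String)) (word : String) =>
      if PySem.Set.contains (PySem.Set.ofList keywords_list) word then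
        (match st.2 with
         | some current => st.1 ++ [pyFinish current]
         | none => st.1, some [word])
      else
        match st.2 with
        | some current => (st.1, some (current ++ [word]))
        | none => st)
    = (fun (st : List (List String) × Option (List String)) (word : String) =>
      if keywords_list.contains word then
        (match st.2 with
         | some current => st.1 ++ [pyFinish current]
         | none => st.1, some [word])
      else
        match st.2 with
        | some current => (st.1, some (current ++ [word]))
        | none => st) := by
    funext st word
    rw [hmem word]
  rw [hfun]
  have := B_loop (fun w => keywords_list.contains w) words_list [] none
  simpa using this

-- ===== VERDICT (by name: the statement is the Claim_ definition above) =====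
theorem divide_list_at_keywords_spec : Claim_equal_divide_list_at_keywords := by
  intro words_list keywords_list _
  unfold Spec_divide_list_at_keywords
  rw [A_eq_secsN, B_eq_raw, secsN_eq_raw]
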